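-- pv_equiv track=rewrite | github.com/dikuznet/python-test-book | 0python-demo/7leetcode/array1_leetcode.py | arrayTest
-- ===== SOURCE A (Python) =====
-- def arrayTest(a,boxTest = False):
--     s = set()
--     for i in a:
--         if not boxTest: s = set()
--         for val in i:
--             if str(val).isdigit():
--                if not (int(val) in s):
--                 s.add(int(val))
--                else:
--                    return False
--     return True
-- ===== SOURCE B (Python) =====
-- def arrayTest(a, boxTest=False):
--     # Sort-based duplicate detection: per scope, sort the digit values and
--     # scan adjacent pairs -- no set is used at all.
--     scopes = [[v for row in a for v in row]] if boxTest else a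
--     for scope in scopes:
--         digits = sorted(int(v) for v in scope if str(v).isdigit())
--         for x, y in zip(digits, digits[1:]):
--             if x == y:
--                 return False
--     return True
-- ===== Notes on version B (the rewrite author's own statement) =====
-- stated objective: alternative
-- what changed: Replaces A's incremental hash-set membership scan with early exit by a sort-based check: per scope, sort the collected digit values and scan adjacent pairs for an equal neighbour; no set is used.
import Mathlib
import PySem

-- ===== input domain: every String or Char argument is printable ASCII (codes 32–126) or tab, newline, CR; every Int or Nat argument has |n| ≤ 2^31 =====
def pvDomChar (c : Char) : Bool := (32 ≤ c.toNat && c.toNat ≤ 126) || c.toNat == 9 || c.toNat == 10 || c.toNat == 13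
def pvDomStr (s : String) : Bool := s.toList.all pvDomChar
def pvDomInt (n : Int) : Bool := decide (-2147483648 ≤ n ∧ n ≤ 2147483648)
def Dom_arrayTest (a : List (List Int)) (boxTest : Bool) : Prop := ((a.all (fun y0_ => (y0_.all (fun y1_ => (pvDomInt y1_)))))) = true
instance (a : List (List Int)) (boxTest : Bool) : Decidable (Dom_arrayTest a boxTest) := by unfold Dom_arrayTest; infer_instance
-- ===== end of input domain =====

-- B replaces A's incremental set-membership scan by a sort-then-adjacent-scan
-- duplicate check per scope (alternative algorithm; same behaviour).


-- ===== PORT A =====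
-- inner 'for val in i' loop: returns none on the 'return False' branch, else the updated set s
def pvRowLoop (s : PySem.Set Int) (row : List Int) : Option (PySem.Set Int) :=
  match row with
  | [] => some s
  | v :: rest =>
    if PySem.Str.strIsdigit (PySem.Int.toStr v) then    -- str(val).isdigit()
      if ¬ PySem.Set.contains s v then                  -- not (int(val) in s); int(val) = val on int
        pvRowLoop (PySem.Set.add s v) rest              -- s.add(int(val))
      else none                                         -- return False
    else pvRowLoop s rest

-- outer 'for i in a' loop, threading s
def pvOuterLoop (s : PySem.Set Int) (rows : List (List Int)) (boxTest : Bool) : Bool :=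
  match rows with
  | [] => true
  | i :: rest =>
    let s := if ¬ boxTest then PySem.Set.empty else s   -- if not boxTest: s = set()
    match pvRowLoop s i with
    | none => false
    | some s' => pvOuterLoop s' rest boxTest

def arrayTest (a : List (List Int)) (boxTest : Bool) : Bool :=
  pvOuterLoop PySem.Set.empty a boxTest

-- ===== PORT B =====
-- digits generator: [int(v) for v in scope if str(v).isdigit()]  (int(v) = v on int)
def pvDigitsOf (scope : List Int) : List Int :=
  scope.filter (fun v => PySem.Str.strIsdigit (PySem.Int.toStr v))

-- 'for x, y in zip(digits, digits[1:]): if x == y: return False' — adjacent-pair scan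
def pvAdjDup : List Int → Bool
  | x :: y :: rest => x == y || pvAdjDup (y :: rest)
  | _ => false

-- one scope passes B's check
def pvScopeOk (scope : List Int) : Bool :=
  !pvAdjDup (PySem.List.sorted (pvDigitsOf scope) (fun x => x) false)

def arrayTest_alt (a : List (List Int)) (boxTest : Bool) : Bool :=
  (if boxTest then [a.flatten] else a).all pvScopeOk

-- ===== PRECONDITION & SPEC =====
def Spec_arrayTest (a : List (List Int)) (boxTest : Bool) (out : Bool) : Prop := out = arrayTest_alt a boxTest
instance (a : List (List Int)) (boxTest : Bool) (out : Bool) : Decidable (Spec_arrayTest a boxTest out) := by unfold Spec_arrayTest; infer_instance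

-- ===== CLAIM (what is proved, stated in full; the proofs are below) =====
def Claim_equal_arrayTest : Prop := ∀ (a : List (List Int)) (boxTest : Bool), Dom_arrayTest a boxTest → Spec_arrayTest a boxTest (arrayTest a boxTest)

-- ===== LEMMAS AND PROOFS =====

-- A's inner loop succeeds iff the row's digits are fresh and duplicate-free; it returns s ++ digits.
theorem pvRowLoop_eq (s : PySem.Set Int) (row : List Int) :
    pvRowLoop s row =
      if (pvDigitsOf row).Nodup ∧ ∀ x ∈ pvDigitsOf row, x ∉ s
      then some (s ++ pvDigitsOf row) else none := by
  induction row generalizing s with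
  | nil => simp [pvRowLoop, pvDigitsOf]
  | cons v rest ih =>
    by_cases hd : PySem.Str.strIsdigit (PySem.Int.toStr v) = true
    · have hdig : pvDigitsOf (v :: rest) = v :: pvDigitsOf rest := by
        simp only [pvDigitsOf, List.filter_cons, hd, if_true]
      by_cases hmem : v ∈ s
      · have hcon : PySem.Set.contains s v = true := by
          simp [PySem.Set.contains, hmem]
        simp only [pvRowLoop, hd, if_true, hcon, not_true, if_false, hdig]
        rw [if_neg]
        rintro ⟨-, h2⟩
        exact h2 v (List.mem_cons_self) hmem
      · have hadd : PySem.Set.add s v = s ++ [v] := by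
          simp [PySem.Set.add, PySem.Set.contains, hmem]
        have hcon : PySem.Set.contains s v = false := by
          simp [PySem.Set.contains, hmem]
        simp only [pvRowLoop, hd, hcon, Bool.false_eq_true, not_false_iff, if_pos,
          hadd, ih, hdig]
        by_cases hc : (pvDigitsOf rest).Nodup ∧ ∀ x ∈ pvDigitsOf rest, x ∉ s ++ [v]
        · have hcond : (v :: pvDigitsOf rest).Nodup ∧ ∀ x ∈ v :: pvDigitsOf rest, x ∉ s := by
            refine ⟨List.nodup_cons.2 ⟨fun hv => (hc.2 v hv) (by simp), hc.1⟩, ?_⟩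
            intro x hx
            rcases List.mem_cons.1 hx with hx | hx
            · exact hx ▸ hmem
            · exact fun hxs => hc.2 x hx (by simp [hxs])
          rw [if_pos hc, if_pos hcond, List.append_assoc, List.singleton_append]
        · have hcond : ¬((v :: pvDigitsOf rest).Nodup ∧ ∀ x ∈ v :: pvDigitsOf rest, x ∉ s) := by
            rintro ⟨h1, h2⟩
            apply hc
            refine ⟨(List.nodup_cons.1 h1).2, fun x hx hxs => ?_⟩
            rcases List.mem_append.1 hxs with h | h
            · exact h2 x (List.mem_cons_of_mem _ hx) h
            · simp only [List.mem_singleton] at h; subst h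
              exact (List.nodup_cons.1 h1).1 hx
          rw [if_neg hc, if_neg hcond]
    · have hdc : PySem.Str.strIsdigit (PySem.Int.toStr v) = false := by simpa using hd
      have hdig : pvDigitsOf (v :: rest) = pvDigitsOf rest := by
        simp only [pvDigitsOf, List.filter_cons, hdc, Bool.false_eq_true, if_false]
      simp only [pvRowLoop, hd, Bool.false_eq_true, if_false, ih, hdig]

-- on a ≤-ordered list, the adjacent-pair scan finds a duplicate iff the list has one
theorem pvAdjDup_of_sorted (l : List Int) (h : l.Pairwise (· ≤ ·)) :
    pvAdjDup l = !decide l.Nodup := by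
  induction l with
  | nil => simp [pvAdjDup]
  | cons x t ih =>
    cases t with
    | nil => simp [pvAdjDup]
    | cons y rest =>
      have hpt : (y :: rest).Pairwise (· ≤ ·) := (List.pairwise_cons.1 h).2
      have hxle : ∀ z ∈ y :: rest, x ≤ z := (List.pairwise_cons.1 h).1
      by_cases hxy : x = y
      · subst hxy
        simp [pvAdjDup, List.nodup_cons]
      · have hnm : x ∉ y :: rest := by
          intro hx
          rcases List.mem_cons.1 hx with h' | h'
          · exact hxy h'
          · have hyle : ∀ z ∈ rest, y ≤ z := (List.pairwise_cons.1 hpt).1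
            have : y ≤ x := hyle x h'
            exact hxy (le_antisymm (hxle y (List.mem_cons_self)) this)
        have : pvAdjDup (x :: y :: rest) = pvAdjDup (y :: rest) := by
          simp [pvAdjDup, hxy]
        rw [this, ih hpt]
        simp [List.nodup_cons, hnm]

-- per-scope: B's sort-then-scan test = 'the digits are duplicate-free'
theorem pvScopeOk_eq (scope : List Int) :
    pvScopeOk scope = decide (pvDigitsOf scope).Nodup := by
  unfold pvScopeOk
  have hperm := PySem.List.sorted_perm (pvDigitsOf scope) (fun x => x) false
  have hnd : (PySem.List.sorted (pvDigitsOf scope) (fun x => x) false).Nodup ↔ (pvDigitsOf scope).Nodup :=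
    hperm.nodup_iff
  rw [pvAdjDup_of_sorted _ (PySem.List.sorted_pairwise (pvDigitsOf scope) (fun x => x))]
  by_cases h : (pvDigitsOf scope).Nodup
  · simp [h, hnd.2 h]
  · simp only [h, decide_false]
    have : ¬(PySem.List.sorted (pvDigitsOf scope) (fun x => x) false).Nodup := fun hs => h (hnd.1 hs)
    simp [this]

-- digits distribute over concatenation
theorem pvDigitsOf_append (l1 l2 : List Int) :
    pvDigitsOf (l1 ++ l2) = pvDigitsOf l1 ++ pvDigitsOf l2 := by
  simp [pvDigitsOf, List.filter_append]

-- boxTest = false: rows are independent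
theorem pvOuter_false (rows : List (List Int)) (s : PySem.Set Int) :
    pvOuterLoop s rows false = rows.all (fun row => decide (pvDigitsOf row).Nodup) := by
  induction rows generalizing s with
  | nil => simp [pvOuterLoop]
  | cons i rest ih =>
    simp only [pvOuterLoop, List.all_cons]
    rw [if_pos (by simp), pvRowLoop_eq]
    by_cases hc : (pvDigitsOf i).Nodup
    · simp [hc, PySem.Set.empty, ih]
    · simp [hc, PySem.Set.empty]

-- a duplicate-freshness condition over a concatenation splits scope by scope
theorem pvSplit (d1 d2 s : List Int) :
    ((d1 ++ d2).Nodup ∧ ∀ x ∈ d1 ++ d2, x ∉ s) ↔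
      ((d1.Nodup ∧ ∀ x ∈ d1, x ∉ s) ∧ (d2.Nodup ∧ ∀ x ∈ d2, x ∉ s ++ d1)) := by
  rw [List.nodup_append]
  constructor
  · rintro ⟨⟨n1, n2, dj⟩, h⟩
    refine ⟨⟨n1, fun x hx => h x (List.mem_append.2 (Or.inl hx))⟩, n2, fun x hx hxs => ?_⟩
    rcases List.mem_append.1 hxs with h' | h'
    · exact h x (List.mem_append.2 (Or.inr hx)) h'
    · exact dj x h' x hx rfl
  · rintro ⟨⟨n1, h1⟩, n2, h2⟩
    refine ⟨⟨n1, n2, fun a ha b hb hab => h2 b hb (List.mem_append.2 (Or.inr (hab ▸ ha)))⟩, fun x hx => ?_⟩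
    rcases List.mem_append.1 hx with hx | hx
    · exact h1 x hx
    · exact fun hxs => h2 x hx (List.mem_append.2 (Or.inl hxs))

-- boxTest = true: the set threads through all rows
theorem pvOuter_true (rows : List (List Int)) (s : PySem.Set Int) :
    pvOuterLoop s rows true =
      decide ((pvDigitsOf rows.flatten).Nodup ∧ ∀ x ∈ pvDigitsOf rows.flatten, x ∉ s) := by
  induction rows generalizing s with
  | nil => simp [pvOuterLoop, pvDigitsOf]
  | cons i rest ih =>
    simp only [pvOuterLoop, List.flatten_cons, pvDigitsOf_append]
    rw [if_neg (by simp), pvRowLoop_eq]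
    by_cases hc : (pvDigitsOf i).Nodup ∧ ∀ x ∈ pvDigitsOf i, x ∉ s
    · rw [if_pos hc]
      show pvOuterLoop (s ++ pvDigitsOf i) rest true = _
      rw [ih]
      refine decide_eq_decide.2 ?_
      rw [pvSplit]
      exact ⟨fun h => ⟨hc, h⟩, fun h => h.2⟩
    · rw [if_neg hc]
      show false = _
      refine (decide_eq_false fun hy => hc ((pvSplit _ _ _).1 hy).1).symm

-- per-row: the two per-row tests agree listwise
theorem pvAll_eq (rows : List (List Int)) :
    rows.all (fun row => decide (pvDigitsOf row).Nodup) = rows.all pvScopeOk := by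
  induction rows with
  | nil => rfl
  | cons i rest ih => simp [pvScopeOk_eq, ih]

-- ===== VERDICT (by name: the statement is the Claim_ definition above) =====
theorem arrayTest_spec : Claim_equal_arrayTest := by
  intro a boxTest _
  unfold Spec_arrayTest arrayTest arrayTest_alt
  cases boxTest with
  | false =>
    rw [pvOuter_false, pvAll_eq]
    simp
  | true =>
    rw [pvOuter_true]
    simp [pvScopeOk_eq, PySem.Set.empty]
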